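-- pv_equiv track=rewrite | github.com/SimCini/python | Ciniltani_BRilevazioniPluviometriche.py | pioggiaMin
-- ===== SOURCE A (Python) =====
-- def pioggiaMin(tupla):
--     min=100
--     mesiMin = []
--     for locazione,dati in tupla:
--         for anno,mesi in dati:
--             for mese,valore in mesi:
--                 if valore<min:
--                     min = valore
--     for locazione,dati in tupla:
--         for anno,mesi in dati:
--             for mese,valore in mesi:
--                 if valore==min:
--                     mesiMin.append(mese)
--     return(mesiMin)
-- ===== SOURCE B (Python) =====
-- def pioggiaMin(tupla):
--     # single pass: maintain current minimum (sentinel 100) and its month list together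
--     minimo = 100
--     mesiMin = []
--     for locazione, dati in tupla:
--         for anno, mesi in dati:
--             for mese, valore in mesi:
--                 if valore < minimo:
--                     minimo = valore
--                     mesiMin = [mese]
--                 elif valore == minimo:
--                     mesiMin.append(mese)
--     return mesiMin
-- ===== Notes on version B (the rewrite author's own statement) =====
-- stated objective: alternative
-- what changed: replaces A's two full traversals (compute the min, then rescan for equal months) by a single traversal folding the pair (current minimum, its month list), resetting the list when a new minimum appears
import Mathlib
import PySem

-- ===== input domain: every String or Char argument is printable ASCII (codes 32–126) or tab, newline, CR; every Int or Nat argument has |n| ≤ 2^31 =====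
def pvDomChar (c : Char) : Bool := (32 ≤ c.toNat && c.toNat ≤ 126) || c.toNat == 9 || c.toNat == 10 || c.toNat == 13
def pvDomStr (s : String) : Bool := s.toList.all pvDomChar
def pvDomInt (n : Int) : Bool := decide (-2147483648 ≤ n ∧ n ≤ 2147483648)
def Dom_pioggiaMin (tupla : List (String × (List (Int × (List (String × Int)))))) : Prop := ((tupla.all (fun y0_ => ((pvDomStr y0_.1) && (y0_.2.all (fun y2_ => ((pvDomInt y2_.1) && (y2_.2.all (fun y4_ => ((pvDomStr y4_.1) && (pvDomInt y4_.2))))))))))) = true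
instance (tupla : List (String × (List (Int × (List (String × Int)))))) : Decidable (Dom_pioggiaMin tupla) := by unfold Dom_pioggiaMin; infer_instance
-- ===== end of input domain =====

-- B is a single traversal maintaining (current minimum, its month list) together,
-- where A traverses everything twice (first the minimum, then a rescan for equal months).

-- ===== PORT A =====
-- first loop nest: running minimum starting from the sentinel 100
def pvMinStep (m : Int) (r : String × Int) : Int := if r.2 < m then r.2 else m
-- second loop nest body: append months whose value equals the minimum
def pvEqStep (v : Int) (acc : List String) (r : String × Int) : List String :=
  if r.2 = v then acc ++ [r.1] else acc

def pioggiaMin (tupla : List (String × (List (Int × (List (String × Int)))))) : List String :=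
  let min : Int :=
    tupla.foldl (fun m p => p.2.foldl (fun m q => q.2.foldl pvMinStep m) m) 100
  tupla.foldl (fun acc p => p.2.foldl (fun acc q => q.2.foldl (pvEqStep min) acc) acc) []

-- ===== PORT B =====
-- single-pass step on the state (current minimum, months achieving it)
def pvBStep (s : Int × List String) (r : String × Int) : Int × List String :=
  if r.2 < s.1 then (r.2, [r.1])
  else if r.2 = s.1 then (s.1, s.2 ++ [r.1])
  else s

def pioggiaMin_alt (tupla : List (String × (List (Int × (List (String × Int)))))) : List String :=
  (tupla.foldl (fun s p => p.2.foldl (fun s q => q.2.foldl pvBStep s) s) ((100 : Int), ([] : List String))).2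

-- ===== PRECONDITION & SPEC =====
def Spec_pioggiaMin (tupla : List (String × (List (Int × (List (String × Int)))))) (out : List String) : Prop := out = pioggiaMin_alt tupla
instance (tupla : List (String × (List (Int × (List (String × Int)))))) (out : List String) : Decidable (Spec_pioggiaMin tupla out) := by unfold Spec_pioggiaMin; infer_instance

-- ===== CLAIM (what is proved, stated in full; the proofs are below) =====
def Claim_equal_pioggiaMin : Prop := ∀ (tupla : List (String × (List (Int × (List (String × Int)))))), Dom_pioggiaMin tupla → Spec_pioggiaMin tupla (pioggiaMin tupla)

-- ===== LEMMAS AND PROOFS =====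

-- the flat list of (month, value) pairs, in A's/B's traversal order
def pvFlat (tupla : List (String × (List (Int × (List (String × Int)))))) : List (String × Int) :=
  tupla.flatMap (fun p => p.2.flatMap (fun q => q.2))

-- months of l whose value is v, in order
def pvEq (l : List (String × Int)) (v : Int) : List String :=
  (l.filter (fun r => r.2 = v)).map Prod.fst

theorem pv_foldl_flatMap {α β γ : Type} (f : γ → β → γ) (g : α → List β) :
    ∀ (l : List α) (b : γ), (l.flatMap g).foldl f b = l.foldl (fun x y => (g y).foldl f x) b := by
  intro l
  induction l with
  | nil => intro b; rfl
  | cons a t ih => intro b; simp [List.flatMap_cons, List.foldl_append, ih]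

theorem pv_foldl_congr {α β : Type} {f g : β → α → β} (h : ∀ b a, f b a = g b a) :
    ∀ (l : List α) (b : β), l.foldl f b = l.foldl g b := by
  intro l
  induction l with
  | nil => intro b; rfl
  | cons a t ih => intro b; simp only [List.foldl_cons, h, ih]

theorem pvEqStep_foldl (v : Int) :
    ∀ (l : List (String × Int)) (acc : List String),
      l.foldl (pvEqStep v) acc = acc ++ pvEq l v := by
  intro l
  induction l with
  | nil => intro acc; simp [pvEq]
  | cons r t ih =>
    intro acc
    by_cases h : r.2 = v <;> simp [pvEqStep, pvEq, h, ih]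

theorem pvMin_le : ∀ (l : List (String × Int)) (m : Int), l.foldl pvMinStep m ≤ m := by
  intro l
  induction l with
  | nil => intro m; simp
  | cons r t ih =>
    intro m
    by_cases h : r.2 < m <;> simp [pvMinStep, h]
    · exact le_trans (ih r.2) (le_of_lt h)
    · exact ih m

-- characterisation of B's single pass in terms of A's two quantities
theorem pvB_char :
    ∀ (l : List (String × Int)) (m : Int) (acc : List String),
      l.foldl pvBStep (m, acc) =
        (l.foldl pvMinStep m,
         if l.foldl pvMinStep m = m then acc ++ pvEq l m else pvEq l (l.foldl pvMinStep m)) := by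
  intro l
  induction l with
  | nil => intro m acc; simp [pvEq]
  | cons r t ih =>
    intro m acc
    rcases lt_trichotomy r.2 m with h | h | h
    · -- new minimum: reset list
      have hm : pvMinStep m r = r.2 := by simp [pvMinStep, h]
      have hne : t.foldl pvMinStep r.2 ≠ m := by
        have := pvMin_le t r.2; omega
      have hstep : pvBStep (m, acc) r = (r.2, [r.1]) := by simp [pvBStep, h]
      simp only [List.foldl_cons, hstep, hm, ih]
      have hne2 : r.2 ≠ m := by omega
      by_cases hM : t.foldl pvMinStep r.2 = r.2
      · simp [hM, hne2, pvEq]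
      · have hlt : t.foldl pvMinStep r.2 < r.2 := lt_of_le_of_ne (pvMin_le t r.2) hM
        have : r.2 ≠ t.foldl pvMinStep r.2 := by omega
        simp [hM, hne, pvEq, this]
    · -- equal to current minimum: append
      have hm : pvMinStep m r = m := by simp [pvMinStep, h]
      have hstep : pvBStep (m, acc) r = (m, acc ++ [r.1]) := by simp [pvBStep, h]
      simp only [List.foldl_cons, hstep, hm, ih]
      by_cases hM : t.foldl pvMinStep m = m
      · simp [hM, pvEq, h]
      · have hlt : t.foldl pvMinStep m < m := lt_of_le_of_ne (pvMin_le t m) hM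
        have : r.2 ≠ t.foldl pvMinStep m := by omega
        simp [hM, pvEq, this]
    · -- larger: skipped
      have hm : pvMinStep m r = m := by simp [pvMinStep]; omega
      have h1 : ¬ r.2 < m := by omega
      have h2 : ¬ r.2 = m := by omega
      have hstep : pvBStep (m, acc) r = (m, acc) := by
        simp [pvBStep, h1, h2]
      simp only [List.foldl_cons, hstep, hm, ih]
      have hle := pvMin_le t m
      have hne : r.2 ≠ t.foldl pvMinStep m := by omega
      have hne2 : r.2 ≠ m := by omega
      simp [pvEq, hne, hne2]

theorem pioggiaMin_eq_flat (tupla : List (String × (List (Int × (List (String × Int)))))) :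
    pioggiaMin tupla = pvEq (pvFlat tupla) ((pvFlat tupla).foldl pvMinStep 100) := by
  unfold pioggiaMin
  have hmin : (tupla.foldl (fun m p => p.2.foldl (fun m q => q.2.foldl pvMinStep m) m) 100 : Int)
      = (pvFlat tupla).foldl pvMinStep 100 := by
    unfold pvFlat
    rw [pv_foldl_flatMap]
    apply pv_foldl_congr
    intro b a
    rw [pv_foldl_flatMap]
  rw [hmin]
  have hsec : ∀ (v : Int),
      (tupla.foldl (fun acc p => p.2.foldl (fun acc q => q.2.foldl (pvEqStep v) acc) acc) ([] : List String))
        = pvEq (pvFlat tupla) v := by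
    intro v
    have : (pvFlat tupla).foldl (pvEqStep v) [] = pvEq (pvFlat tupla) v := by
      simpa using pvEqStep_foldl v (pvFlat tupla) []
    rw [← this]
    unfold pvFlat
    rw [pv_foldl_flatMap]
    apply pv_foldl_congr
    intro b a
    rw [pv_foldl_flatMap]
  exact hsec _

theorem pioggiaMin_alt_eq_flat (tupla : List (String × (List (Int × (List (String × Int)))))) :
    pioggiaMin_alt tupla = ((pvFlat tupla).foldl pvBStep ((100 : Int), ([] : List String))).2 := by
  unfold pioggiaMin_alt pvFlat
  rw [pv_foldl_flatMap]
  congr 1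
  apply pv_foldl_congr
  intro b a
  rw [pv_foldl_flatMap]

-- ===== VERDICT (by name: the statement is the Claim_ definition above) =====
theorem pioggiaMin_spec : Claim_equal_pioggiaMin := by
  intro tupla _
  unfold Spec_pioggiaMin
  rw [pioggiaMin_eq_flat, pioggiaMin_alt_eq_flat, pvB_char]
  by_cases h : (pvFlat tupla).foldl pvMinStep 100 = 100 <;> simp [h]
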